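-- pv_equiv track=rewrite | github.com/matalvernaz/ffn-dl | ffn_dl/wattpad.py | _enclosing_json_object
-- ===== SOURCE A (Python) =====
-- def _enclosing_json_object(text, idx):
--     """Return ``(start, end)`` of the innermost balanced JSON object that
--     contains position ``idx``, or ``(None, None)`` if no such span exists.
--
--     String- and escape-aware: braces inside JSON string literals don't
--     affect the depth count. A forward, single-pass scan keeps a stack
--     of ``{`` positions; each ``}`` pops the matching open. The first
--     time a pop produces a span that covers ``idx``, we've found the
--     innermost enclosing object (inner objects close before outer ones
--     on a forward scan), so we can return immediately.
--
--     The naive version this replaces counted raw braces without string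
--     awareness. Wattpad's SSR payload escapes braces inside strings as
--     ``\\u007b`` so the naive counter held in practice, but any format
--     change — user-supplied titles with raw braces, a different JSON
--     serialiser — would miscount and either strand the caller or slice
--     an unparseable span. This version is correct for any JSON.
--     """
--     stack = []
--     in_string = False
--     escape_next = False
--     for i, c in enumerate(text):
--         if in_string:
--             if escape_next:
--                 escape_next = False
--             elif c == "\\":
--                 escape_next = True
--             elif c == '"':
--                 in_string = False
--             continue
--         if c == '"':
--             in_string = True
--         elif c == "{":
--             stack.append(i)
--         elif c == "}":
--             if stack:
--                 start = stack.pop()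
--                 end = i + 1
--                 if start <= idx < end:
--                     return start, end
--     return None, None
-- ===== SOURCE B (Python) =====
-- def _enclosing_json_object(text, idx):
--     """Three-stage pipeline instead of one fused scan-and-early-return:
--     (1) strip JSON string literals, keeping (position, char) pairs of the
--         text outside strings (escape-aware 3-state machine);
--     (2) match braces over the stripped stream, recording every balanced
--         object span (start, end) in pop order;
--     (3) query: the innermost enclosing object is the containing span with
--         the largest start; (None, None) if no span contains idx."""
--     # stage 1: string-literal stripper
--     outside = []
--     state = 0  # 0 = code, 1 = inside string, 2 = after backslash in string
--     for i, c in enumerate(text):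
--         if state == 0:
--             if c == '"':
--                 state = 1
--             else:
--                 outside.append((i, c))
--         elif state == 1:
--             if c == "\\":
--                 state = 2
--             elif c == '"':
--                 state = 0
--         else:
--             state = 1
--     # stage 2: plain brace matcher (no string logic left)
--     spans = []
--     stack = []
--     for i, c in outside:
--         if c == "{":
--             stack.append(i)
--         elif c == "}":
--             if stack:
--                 spans.append((stack.pop(), i + 1))
--     # stage 3: pick the containing span with maximal start
--     best = (None, None)
--     for s, e in spans:
--         if s <= idx < e and (best[0] is None or best[0] < s):
--             best = (s, e)
--     return best
-- ===== Notes on version B (the rewrite author's own statement) =====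
-- stated objective: alternative
-- what changed: Replaces the fused scan-and-early-return with a three-stage pipeline: strip string literals to a (pos,char) stream, run a plain brace matcher over it recording all balanced spans, then query for the containing span with the largest start.
import Mathlib
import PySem

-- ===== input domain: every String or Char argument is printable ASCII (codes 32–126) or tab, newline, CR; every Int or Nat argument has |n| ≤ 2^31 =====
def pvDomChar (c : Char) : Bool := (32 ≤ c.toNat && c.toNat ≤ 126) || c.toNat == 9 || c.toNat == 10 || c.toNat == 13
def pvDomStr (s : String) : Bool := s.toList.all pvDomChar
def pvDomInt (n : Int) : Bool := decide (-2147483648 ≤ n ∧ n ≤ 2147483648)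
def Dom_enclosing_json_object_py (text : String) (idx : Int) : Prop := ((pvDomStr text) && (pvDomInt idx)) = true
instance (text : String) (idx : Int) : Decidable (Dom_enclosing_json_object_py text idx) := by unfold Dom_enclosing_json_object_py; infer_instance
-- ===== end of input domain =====

-- B replaces A's fused scan-and-early-return with a three-stage pipeline
-- (strip string literals / match braces / query max-start containing span);
-- alternative decomposition, same cost.

-- ===== PORT A =====
-- for-loop of A over (i, c) with stack/in_string/escape_next state and early return on a containing pop
def pvLoopA (idx : Int) : List Char → Int → List Int → Bool → Bool → Option (Int × Int)
  | [], _, _, _, _ => none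
  | c :: cs, i, stack, inStr, esc =>
    if inStr then
      if esc then pvLoopA idx cs (i + 1) stack inStr false
      else if c = '\\' then pvLoopA idx cs (i + 1) stack inStr true
      else if c = '"' then pvLoopA idx cs (i + 1) stack false esc
      else pvLoopA idx cs (i + 1) stack inStr esc
    else if c = '"' then pvLoopA idx cs (i + 1) stack true esc
    else if c = '{' then pvLoopA idx cs (i + 1) (i :: stack) inStr esc
    else if c = '}' then
      match stack with
      | [] => pvLoopA idx cs (i + 1) stack inStr esc
      | s :: rest =>
        if s ≤ idx ∧ idx < i + 1 then some (s, i + 1)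
        else pvLoopA idx cs (i + 1) rest inStr esc
    else pvLoopA idx cs (i + 1) stack inStr esc

def enclosing_json_object_py (text : String) (idx : Int) : Option Int × Option Int :=
  match pvLoopA idx text.toList 0 [] false false with
  | some (s, e) => (some s, some e)
  | none => (none, none)

-- ===== PORT B =====
-- stage 1 of B: strip string literals, keeping (position, char) of text outside strings
-- (state 0 = code, 1 = inside string, 2 = after backslash in string)
def pvStrip : List Char → Int → Int → List (Int × Char)
  | [], _, _ => []
  | c :: cs, i, state =>
    if state = 0 then
      if c = '"' then pvStrip cs (i + 1) 1
      else (i, c) :: pvStrip cs (i + 1) 0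
    else if state = 1 then
      if c = '\\' then pvStrip cs (i + 1) 2
      else if c = '"' then pvStrip cs (i + 1) 0
      else pvStrip cs (i + 1) 1
    else pvStrip cs (i + 1) 1

-- stage 2 of B: plain brace matcher over the stripped stream, appending spans in pop order
def pvMatch : List (Int × Char) → List Int → List (Int × Int) → List (Int × Int)
  | [], _, spans => spans
  | (i, c) :: rest, stack, spans =>
    if c = '{' then pvMatch rest (i :: stack) spans
    else if c = '}' then
      match stack with
      | [] => pvMatch rest stack spans
      | s :: st => pvMatch rest st (spans ++ [(s, i + 1)])
    else pvMatch rest stack spans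

-- stage 3 of B: keep the containing span with the largest start, starting from (None, None)
def pvBest (idx : Int) : List (Int × Int) → Option Int × Option Int → Option Int × Option Int
  | [], best => best
  | (s, e) :: rest, best =>
    if decide (s ≤ idx ∧ idx < e) && best.1.elim true (fun b => decide (b < s)) then
      pvBest idx rest (some s, some e)
    else
      pvBest idx rest best

def enclosing_json_object_py_alt (text : String) (idx : Int) : Option Int × Option Int :=
  pvBest idx (pvMatch (pvStrip text.toList 0 0) [] []) (none, none)

-- ===== PRECONDITION & SPEC =====
def Spec_enclosing_json_object_py (text : String) (idx : Int) (out : Option Int × Option Int) : Prop := out = enclosing_json_object_py_alt text idx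
instance (text : String) (idx : Int) (out : Option Int × Option Int) : Decidable (Spec_enclosing_json_object_py text idx out) := by unfold Spec_enclosing_json_object_py; infer_instance

-- ===== CLAIM (what is proved, stated in full; the proofs are below) =====
def Claim_equal_enclosing_json_object_py : Prop := ∀ (text : String) (idx : Int), Dom_enclosing_json_object_py text idx → Spec_enclosing_json_object_py text idx (enclosing_json_object_py text idx)

-- ===== LEMMAS AND PROOFS =====

-- accumulator-free brace matcher, proof helper
def pvMatchP : List (Int × Char) → List Int → List (Int × Int)
  | [], _ => []
  | (i, c) :: rest, stack =>
    if c = '{' then pvMatchP rest (i :: stack)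
    else if c = '}' then
      match stack with
      | [] => pvMatchP rest stack
      | s :: st => (s, i + 1) :: pvMatchP rest st
    else pvMatchP rest stack

theorem pvMatch_eq (l : List (Int × Char)) : ∀ (stack : List Int) (spans : List (Int × Int)),
    pvMatch l stack spans = spans ++ pvMatchP l stack := by
  induction l with
  | nil => intro stack spans; simp [pvMatch, pvMatchP]
  | cons p rest ih =>
    intro stack spans
    obtain ⟨i, c⟩ := p
    simp only [pvMatch, pvMatchP]
    split_ifs <;> try (exact ih ..)
    match stack with
    | [] => exact ih ..
    | s :: st => simp [ih]

-- fused-state scan of the spans, in pop order (bridge between A's loop and B's pipeline)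
def pvScanP : List Char → Int → List Int → Bool → Bool → List (Int × Int)
  | [], _, _, _, _ => []
  | c :: cs, i, stack, inStr, esc =>
    if inStr then
      if esc then pvScanP cs (i + 1) stack inStr false
      else if c = '\\' then pvScanP cs (i + 1) stack inStr true
      else if c = '"' then pvScanP cs (i + 1) stack false esc
      else pvScanP cs (i + 1) stack inStr esc
    else if c = '"' then pvScanP cs (i + 1) stack true esc
    else if c = '{' then pvScanP cs (i + 1) (i :: stack) inStr esc
    else if c = '}' then
      match stack with
      | [] => pvScanP cs (i + 1) stack inStr esc
      | s :: rest => (s, i + 1) :: pvScanP cs (i + 1) rest inStr esc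
    else pvScanP cs (i + 1) stack inStr esc

-- B's staged strip+match computes the same span list as the fused scan
theorem pvStrip_match (cs : List Char) : ∀ (i : Int) (stack : List Int),
    pvMatchP (pvStrip cs i 0) stack = pvScanP cs i stack false false ∧
    pvMatchP (pvStrip cs i 1) stack = pvScanP cs i stack true false ∧
    pvMatchP (pvStrip cs i 2) stack = pvScanP cs i stack true true := by
  induction cs with
  | nil => intro i stack; simp [pvStrip, pvMatchP, pvScanP]
  | cons c cs ih =>
    intro i stack
    refine ⟨?_, ?_, ?_⟩
    · simp only [pvStrip, pvScanP]
      by_cases hq : c = '"'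
      · simp [hq, (ih (i + 1) stack).2.1]
      · by_cases hob : c = '{'
        · simp [hob, pvMatchP, (ih (i + 1) (i :: stack)).1]
        · by_cases hcb : c = '}'
          · simp only [hcb, if_true]
            match stack with
            | [] => exact (ih (i + 1) []).1
            | s :: st => simp [pvMatchP, (ih (i + 1) st).1]
          · simp [hq, hob, hcb, pvMatchP, (ih (i + 1) stack).1]
    · simp only [pvStrip, pvScanP]
      by_cases hb : c = '\\'
      · simp [hb, (ih (i + 1) stack).2.2]
      · by_cases hq : c = '"'
        · simp [hq, (ih (i + 1) stack).1]
        · simp [hb, hq, (ih (i + 1) stack).2.1]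
    · simp only [pvStrip, pvScanP]
      simp [(ih (i + 1) stack).2.1]

-- A's early-returning loop finds the first span (in pop order) containing idx
theorem pvLoopA_eq_find (idx : Int) (cs : List Char) :
    ∀ (i : Int) (stack : List Int) (inStr esc : Bool),
    pvLoopA idx cs i stack inStr esc =
      (pvScanP cs i stack inStr esc).find? (fun p => decide (p.1 ≤ idx ∧ idx < p.2)) := by
  induction cs with
  | nil => intro i stack a b; simp [pvLoopA, pvScanP]
  | cons c cs ih =>
    intro i stack a b
    simp only [pvLoopA, pvScanP]
    split_ifs <;> try (exact ih ..)
    match stack with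
    | [] => exact ih ..
    | s :: rest =>
      by_cases h : s ≤ idx ∧ idx < i + 1
      · have h' : s ≤ idx ∧ idx ≤ i := by omega
        simp [List.find?, h']
      · have h' : ¬(s ≤ idx ∧ idx ≤ i) := by omega
        simp [List.find?, h', ih]

-- order relation between an earlier and a later span in pop order: disjoint-after or strictly nesting
def pvR (a b : Int × Int) : Prop := a.2 ≤ b.1 ∨ (b.1 < a.1 ∧ a.2 ≤ b.2)

theorem pvScanP_props (cs : List Char) :
    ∀ (i : Int) (stack : List Int) (inStr esc : Bool),
    stack.Pairwise (· > ·) → (∀ s ∈ stack, s < i) →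
    ((pvScanP cs i stack inStr esc).Pairwise pvR ∧
     ∀ p ∈ pvScanP cs i stack inStr esc, (p.1 ∈ stack ∨ i ≤ p.1) ∧ i < p.2) := by
  induction cs with
  | nil => intro i stack a b _ _; simp [pvScanP]
  | cons c cs ih =>
    intro i stack a b hpw hlt
    have hlt' : ∀ s ∈ stack, s < i + 1 := fun s hs => by have := hlt s hs; omega
    have base : ∀ (a b : Bool),
        ((pvScanP cs (i+1) stack a b).Pairwise pvR ∧
         ∀ p ∈ pvScanP cs (i+1) stack a b, (p.1 ∈ stack ∨ i ≤ p.1) ∧ i < p.2) := by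
      intro a b
      obtain ⟨h1, h2⟩ := ih (i+1) stack a b hpw hlt'
      exact ⟨h1, fun p hp => ⟨(h2 p hp).1.imp id (by omega), by have := (h2 p hp).2; omega⟩⟩
    simp only [pvScanP]
    split_ifs
    · exact base _ _
    · exact base _ _
    · exact base _ _
    · exact base _ _
    · exact base _ _
    · -- push case
      have hpw' : (i :: stack).Pairwise (· > ·) := List.pairwise_cons.mpr ⟨hlt, hpw⟩
      have hlt'' : ∀ s ∈ (i :: stack), s < i + 1 := by
        intro s hs; rcases List.mem_cons.mp hs with h | h
        · omega
        · have := hlt s h; omega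
      obtain ⟨h1, h2⟩ := ih (i+1) (i :: stack) a b hpw' hlt''
      refine ⟨h1, fun p hp => ?_⟩
      obtain ⟨hmem, hlt2⟩ := h2 p hp
      constructor
      · rcases hmem with h | h
        · rcases List.mem_cons.mp h with h | h
          · right; omega
          · left; exact h
        · right; omega
      · omega
    · -- pop case
      rcases hstack : stack with _ | ⟨s, rest⟩
      · subst hstack; exact base _ _
      · subst hstack
        have hpwrest : rest.Pairwise (· > ·) := (List.pairwise_cons.mp hpw).2
        have hsgt : ∀ x ∈ rest, x < s := fun x hx => (List.pairwise_cons.mp hpw).1 x hx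
        have hltrest : ∀ x ∈ rest, x < i + 1 := fun x hx => hlt' x (by simp [hx])
        obtain ⟨h1, h2⟩ := ih (i+1) rest a b hpwrest hltrest
        constructor
        · refine List.pairwise_cons.mpr ⟨fun p hp => ?_, h1⟩
          obtain ⟨hmem, hlt2⟩ := h2 p hp
          rcases hmem with h | h
          · exact Or.inr ⟨hsgt p.1 h, by omega⟩
          · exact Or.inl (by simpa [pvR] using h)
        · intro p hp
          rcases List.mem_cons.mp hp with hp | hp
          · subst hp; exact ⟨Or.inl (by simp), by omega⟩
          · obtain ⟨hmem, hlt2⟩ := h2 p hp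
            refine ⟨?_, by omega⟩
            rcases hmem with h | h
            · exact Or.inl (by simp [h])
            · exact Or.inr (by omega)
    · exact base _ _

theorem pvBest_skip (idx s e : Int) (L : List (Int × Int))
    (h : ∀ p ∈ L, p.1 ≤ idx ∧ idx < p.2 → p.1 < s) :
    pvBest idx L (some s, some e) = (some s, some e) := by
  induction L with
  | nil => rfl
  | cons q L ih =>
    obtain ⟨s', e'⟩ := q
    have hcond : (decide (s' ≤ idx ∧ idx < e') &&
        (some s, some e).1.elim true (fun b => decide (b < s'))) = false := by
      simp only [Option.elim, Bool.and_eq_false_iff, decide_eq_false_iff_not]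
      by_cases hc : s' ≤ idx ∧ idx < e'
      · have := h (s', e') (by simp) hc; right; omega
      · left; exact hc
    simp only [pvBest, hcond, Bool.false_eq_true, if_false]
    exact ih fun p hp hpc => h p (List.mem_cons.mpr (Or.inr hp)) hpc

theorem pvBest_eq_find (idx : Int) (L : List (Int × Int)) (h : L.Pairwise pvR) :
    pvBest idx L (none, none) =
      (match L.find? (fun p => decide (p.1 ≤ idx ∧ idx < p.2)) with
       | some (s, e) => (some s, some e)
       | none => ((none : Option Int), (none : Option Int))) := by
  induction L with
  | nil => rfl
  | cons q L ih =>
    obtain ⟨s, e⟩ := q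
    obtain ⟨hhead, htail⟩ := List.pairwise_cons.mp h
    by_cases hc : s ≤ idx ∧ idx < e
    · simp only [pvBest, Option.elim, Bool.and_true, hc]
      rw [pvBest_skip]
      · simp [List.find?, hc]
      · intro p hp hpc
        rcases hhead p hp with hr | hr
        · omega
        · exact hr.1
    · simp only [pvBest, Option.elim, Bool.and_true, hc, decide_false,
        Bool.false_eq_true, if_false]
      rw [ih htail]
      simp [List.find?, hc]

-- ===== VERDICT (by name: the statement is the Claim_ definition above) =====
theorem enclosing_json_object_py_spec : Claim_equal_enclosing_json_object_py := by
  intro text idx _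
  unfold Spec_enclosing_json_object_py enclosing_json_object_py enclosing_json_object_py_alt
  rw [pvMatch_eq, List.nil_append, (pvStrip_match text.toList 0 []).1,
      pvBest_eq_find idx _ (pvScanP_props text.toList 0 [] false false (by simp) (by simp)).1,
      pvLoopA_eq_find]
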